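-- pv_equiv track=rewrite | github.com/i960107/algorithm | goorm/AlgorithmMonday/직사각형만들기.py | solution
-- ===== SOURCE A (Python) =====
-- from typing import List
-- from collections import Counter
--
-- def solution(n: int, sticks: List[int]) -> int:
--     counter = Counter(sticks)
--     s = []
--     for x, cnt in counter.items():
--         s += ([x] * (cnt // 2))
--     s.sort(reverse=True)
--     area = 0
--
--     for i in range(0, len(s) - 1, 2):
--         x = s[i]
--         y = s[i + 1]
--         area += x * y
--     return area
-- ===== SOURCE B (Python) =====
-- from typing import List
--
-- def solution(n: int, sticks: List[int]) -> int:
--     t = sorted(sticks, reverse=True)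
--     area = 0
--     pending = None
--     i = 0
--     while i + 1 < len(t):
--         if t[i] == t[i + 1]:
--             if pending is None:
--                 pending = t[i]
--             else:
--                 area += pending * t[i]
--                 pending = None
--             i += 2
--         else:
--             i += 1
--     return area
-- ===== Notes on version B (the rewrite author's own statement) =====
-- stated objective: simpler
-- what changed: Replaces the Counter aggregation, per-key replicated half-count lists, separate descending re-sort and indexed range(0,len-1,2) pairing loop by one descending sort followed by a single adjacent-equal scan that pairs equal neighbours and accumulates the area on the fly (no Counter, no side list, no second sort).
import Mathlib
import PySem

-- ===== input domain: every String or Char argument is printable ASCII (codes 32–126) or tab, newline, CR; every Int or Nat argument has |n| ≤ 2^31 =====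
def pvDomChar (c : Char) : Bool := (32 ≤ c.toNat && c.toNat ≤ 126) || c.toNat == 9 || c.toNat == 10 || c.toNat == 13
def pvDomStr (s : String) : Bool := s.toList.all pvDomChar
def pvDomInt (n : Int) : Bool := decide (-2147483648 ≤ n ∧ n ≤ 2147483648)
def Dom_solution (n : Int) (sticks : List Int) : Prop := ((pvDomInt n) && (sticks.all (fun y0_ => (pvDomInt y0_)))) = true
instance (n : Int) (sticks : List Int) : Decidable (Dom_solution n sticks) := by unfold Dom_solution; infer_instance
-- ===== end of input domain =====

-- B replaces A's Counter aggregation + separate re-sort + indexed pairing loop by one descending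
-- sort and a single adjacent-equal scan that accumulates the area on the fly (objective: simpler).

-- ===== PORT A =====
-- '[x] * (cnt // 2)': Python list repetition; cnt = a Counter count is ≥ 0, so '.toNat' of the
-- floor quotient is exact here (Python repeats max(k,0) times, matching toNat on this domain).
def solution (_n : Int) (sticks : List Int) : Int :=
  let counter := PySem.Dict.counter sticks
  let s := counter.items.foldl
    (fun acc xc => acc ++ List.replicate ((PySem.Int.floordiv xc.2 2).toNat) xc.1) []
  let s := PySem.List.sorted s (fun x => x) true
  -- s[i], s[i+1]: every i in range(0, len(s)-1, 2) is in range, so pyGetD's default is never used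
  let area := (PySem.List.pyRange 0 (PySem.List.len s - 1) 2).foldl
    (fun area i => area + PySem.List.pyGetD s i 0 * PySem.List.pyGetD s (i + 1) 0) 0
  area

-- ===== PORT B =====
-- the 'while i + 1 < len(t)' loop of Source B: the first argument is the suffix of t from index i
def solutionAltGo : List Int → Option Int → Int → Int
  | a :: b :: rest, pending, area =>
    if a == b then
      match pending with
      | none => solutionAltGo rest (some a) area
      | some p => solutionAltGo rest none (area + p * a)
    else solutionAltGo (b :: rest) pending area
  | _, _, area => area

def solution_alt (_n : Int) (sticks : List Int) : Int :=
  solutionAltGo (PySem.List.sorted sticks (fun x => x) true) none 0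

-- ===== PRECONDITION & SPEC =====
def Spec_solution (n : Int) (sticks : List Int) (out : Int) : Prop := out = solution_alt n sticks
instance (n : Int) (sticks : List Int) (out : Int) : Decidable (Spec_solution n sticks out) := by unfold Spec_solution; infer_instance

-- ===== CLAIM (what is proved, stated in full; the proofs are below) =====
def Claim_equal_solution : Prop := ∀ (n : Int) (sticks : List Int), Dom_solution n sticks → Spec_solution n sticks (solution n sticks)

-- ===== LEMMAS AND PROOFS =====

/-- The list of paired sides extracted from a list by B's adjacent-equal scan. -/
def pairs : List Int → List Int
  | a :: b :: rest => if a = b then a :: pairs rest else pairs (b :: rest)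
  | _ => []

/-- Area of consecutive disjoint pairs: x*y summed two by two. -/
def pairArea : List Int → Int
  | x :: y :: r => x * y + pairArea r
  | _ => 0

def pendArea : Option Int → List Int → Int
  | none, l => pairArea l
  | some _, [] => 0
  | some p, x :: r => p * x + pairArea r

theorem solutionAltGo_eq (t : List Int) (pending : Option Int) (area : Int) :
    solutionAltGo t pending area = area + pendArea pending (pairs t) := by
  induction t, pending, area using solutionAltGo.induct with
  | case1 a b rest area hab ih =>
    have h : a = b := by simpa using hab
    subst h
    have hp : pairs (a :: a :: rest) = a :: pairs rest := by simp [pairs]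
    rw [show solutionAltGo (a :: a :: rest) none area = solutionAltGo rest (some a) area by
          simp [solutionAltGo], ih, hp]
    cases pairs rest <;> simp [pendArea, pairArea]
  | case2 a b rest area hab p ih =>
    have h : a = b := by simpa using hab
    subst h
    have hp : pairs (a :: a :: rest) = a :: pairs rest := by simp [pairs]
    rw [show solutionAltGo (a :: a :: rest) (some p) area = solutionAltGo rest none (area + p * a) by
          simp [solutionAltGo], ih, hp]
    simp [pendArea]
    ring
  | case3 a b rest pending area hab ih =>
    have h : ¬ a = b := by simpa using hab
    rw [show solutionAltGo (a :: b :: rest) pending area = solutionAltGo (b :: rest) pending area by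
          simp [solutionAltGo, hab], ih, show pairs (a :: b :: rest) = pairs (b :: rest) by
          simp [pairs, h]]
  | case4 t pending area h =>
    match t, h with
    | [], _ => cases pending <;> simp [solutionAltGo, pairs, pendArea, pairArea]
    | [a], _ => cases pending <;> simp [solutionAltGo, pairs, pendArea, pairArea]
    | a :: b :: r, h => exact (h a b r rfl).elim

theorem pairs_sublist (t : List Int) : List.Sublist (pairs t) t := by
  induction t using pairs.induct with
  | case1 b rest ih =>
    simp only [pairs]
    exact List.Sublist.cons₂ _ (ih.trans (List.sublist_cons_self _ _))
  | case2 a b rest hab ih =>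
    simp only [pairs, if_neg hab]
    exact ih.trans (List.sublist_cons_self _ _)
  | case3 t h =>
    match t, h with
    | [], _ => simp [pairs]
    | [a], _ => simp [pairs]
    | a :: b :: r, h => exact (h a b r rfl).elim

theorem count_pairs (t : List Int) (hs : t.Pairwise (fun a b => b ≤ a)) (v : Int) :
    (pairs t).count v = t.count v / 2 := by
  induction t using pairs.induct with
  | case1 b rest ih =>
    have hrest : rest.Pairwise (fun a b => b ≤ a) := (hs.tail).tail
    have hp : pairs (b :: b :: rest) = b :: pairs rest := by simp [pairs]
    rw [hp, List.count_cons, List.count_cons, List.count_cons, ih hrest]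
    split_ifs <;> omega
  | case2 a b rest hab ih =>
    have hrest : (b :: rest).Pairwise (fun a b => b ≤ a) := hs.tail
    have hnot : a ∉ b :: rest := by
      intro hmem
      rcases List.mem_cons.mp hmem with h' | h'
      · exact hab h'
      · have h1 : a ≤ b := List.rel_of_pairwise_cons hrest h'
        have h2 : b ≤ a := List.rel_of_pairwise_cons hs (List.mem_cons_self ..)
        exact hab (le_antisymm h1 h2)
    have hp : pairs (a :: b :: rest) = pairs (b :: rest) := by simp [pairs, hab]
    have h0 : (b :: rest).count a = 0 := List.count_eq_zero.mpr hnot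
    rw [hp, ih hrest]
    by_cases hv : a = v
    · subst hv
      rw [List.count_cons_self, h0]
    · simp [List.count_cons, hv]
  | case3 t h =>
    match t, h with
    | [], _ => simp [pairs]
    | [a], _ =>
      simp only [pairs, List.count_nil, List.count_cons, List.count_nil, Nat.zero_add]
      split_ifs <;> simp
    | a :: b :: r, h => exact (h a b r rfl).elim

/-- helper: pyGetD two deep into a cons-cons, nonneg index -/
theorem pyGetD_cons_cons (x y : Int) (r : List Int) (k : Nat) :
    PySem.List.pyGetD (x :: y :: r) ((2 : Int) * ((k : Int) + 1)) 0 = PySem.List.pyGetD r (2 * (k : Int)) 0 ∧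
    PySem.List.pyGetD (x :: y :: r) ((2 : Int) * ((k : Int) + 1) + 1) 0 = PySem.List.pyGetD r (2 * (k : Int) + 1) 0 := by
  constructor
  · rw [PySem.List.pyGetD_of_nonneg _ _ (by positivity), PySem.List.pyGetD_of_nonneg _ _ (by positivity)]
    rw [show ((2 : Int) * ((k : Int) + 1)).toNat = (2 * (k : Int)).toNat + 2 by omega]
    simp [List.getD]
  · rw [PySem.List.pyGetD_of_nonneg _ _ (by positivity), PySem.List.pyGetD_of_nonneg _ _ (by positivity)]
    rw [show ((2 : Int) * ((k : Int) + 1) + 1).toNat = (2 * (k : Int) + 1).toNat + 2 by omega]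
    simp [List.getD]

theorem natloop (s : List Int) : ∀ init : Int,
    (List.range (s.length / 2)).foldl
      (fun (area : Int) (k : Nat) =>
        area + PySem.List.pyGetD s (2 * (k : Int)) 0 * PySem.List.pyGetD s (2 * (k : Int) + 1) 0) init
    = init + pairArea s := by
  induction s using pairArea.induct with
  | case1 x y r ih =>
    intro init
    have hlen : (x :: y :: r).length / 2 = r.length / 2 + 1 := by
      simp only [List.length_cons]; omega
    rw [hlen, List.range_succ_eq_map, List.foldl_cons, List.foldl_map]
    have h0 : PySem.List.pyGetD (x :: y :: r) (2 * ((0 : Nat) : Int)) 0 = x := by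
      norm_num [PySem.List.pyGetD_of_nonneg]
    have h1 : PySem.List.pyGetD (x :: y :: r) (2 * ((0 : Nat) : Int) + 1) 0 = y := by
      norm_num [PySem.List.pyGetD_of_nonneg]
    rw [h0, h1]
    rw [PySem.List.foldl_congr_mem _ _
      (fun (area : Int) (k : Nat) =>
        area + PySem.List.pyGetD r (2 * (k : Int)) 0 * PySem.List.pyGetD r (2 * (k : Int) + 1) 0) _
      (by
        intro acc k _
        have hk := pyGetD_cons_cons x y r k
        push_cast
        rw [hk.1, hk.2])]
    rw [ih]
    simp [pairArea]
    ring
  | case2 t h =>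
    match t, h with
    | [], _ => intro init; simp [pairArea]
    | [a], _ => intro init; simp [pairArea]
    | a :: b :: r, h => exact (h a b r rfl).elim

theorem range2_loop (s : List Int) (init : Int) :
    (PySem.List.pyRange 0 (PySem.List.len s - 1) 2).foldl
      (fun area i => area + PySem.List.pyGetD s i 0 * PySem.List.pyGetD s (i + 1) 0) init
    = init + pairArea s := by
  rw [PySem.List.pyRange_of_pos _ _ (by norm_num : (0:Int) < 2)]
  by_cases h : (0 : Int) < PySem.List.len s - 1
  · have hn : ((PySem.List.len s - 1 - 0 + 2 - 1) / 2).toNat = s.length / 2 := by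
      simp only [PySem.List.len] at *; omega
    rw [if_pos h, hn, List.foldl_map]
    have := natloop s init
    simp only [zero_add] at this ⊢
    exact this
  · have hlen : s.length ≤ 1 := by
      simp only [PySem.List.len] at h; omega
    rw [if_neg h]
    match s, hlen with
    | [], _ => simp [pairArea]
    | [a], _ => simp [pairArea]

theorem count_flatMap_replicate (l : List Int) (hl : l.Nodup) (h : Int → Nat) (v : Int) :
    (l.flatMap (fun k => List.replicate (h k) k)).count v = if v ∈ l then h v else 0 := by
  induction l with
  | nil => simp
  | cons k rest ih =>
    have hk : k ∉ rest := (List.nodup_cons.mp hl).1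
    have hrest := (List.nodup_cons.mp hl).2
    simp only [List.flatMap_cons, List.count_append, ih hrest, List.count_replicate, List.mem_cons]
    by_cases hv : v = k
    · subst hv; simp [hk]
    · simp [hv, Ne.symm hv]

theorem halfcount (c : Nat) : ((PySem.Int.floordiv (c : Int) 2).toNat) = c / 2 := by
  have hf : (c : Int).fdiv 2 = (c : Int) / 2 := by
    rw [Int.fdiv_eq_ediv]; simp
  rw [PySem.Int.floordiv, hf]
  omega

-- ===== VERDICT (by name: the statement is the Claim_ definition above) =====
theorem solution_spec : Claim_equal_solution := by
  intro n sticks _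
  unfold Spec_solution solution solution_alt
  simp only []
  -- A's side list before the sort, as a flatMap over the distinct sticks
  rw [PySem.List.foldl_append_eq_flatMap, PySem.Dict.items_counter, List.flatMap_map]
  simp only [List.nil_append]
  set t := PySem.List.sorted sticks (fun x => x) true with ht
  set src := (PySem.Set.ofList sticks).flatMap
      (fun k => List.replicate ((PySem.Int.floordiv ((sticks.count k : Int)) 2).toNat) k) with hsrc
  set sA := PySem.List.sorted src (fun x => x) true with hsA
  -- counts of both side lists are count/2
  have hcount_src : ∀ v, src.count v = sticks.count v / 2 := by
    intro v
    rw [hsrc, count_flatMap_replicate _ (PySem.Set.nodup_ofList sticks)]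
    by_cases hv : v ∈ sticks
    · rw [if_pos ((PySem.Set.mem_ofList sticks v).mpr hv), halfcount]
    · rw [if_neg (fun hmem => hv ((PySem.Set.mem_ofList sticks v).mp hmem)),
        List.count_eq_zero.mpr hv]
  have htsort : t.Pairwise (fun a b => b ≤ a) := PySem.List.sorted_pairwise_rev sticks _
  have hcount_pairs : ∀ v, (pairs t).count v = sticks.count v / 2 := by
    intro v
    rw [count_pairs t htsort v, (PySem.List.sorted_perm sticks (fun x => x) true).count_eq]
  -- the two side lists are equal: same counts, both sorted descending
  have hperm : sA.Perm (pairs t) := by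
    rw [List.perm_iff_count]
    intro v
    rw [(PySem.List.sorted_perm src (fun x => x) true).count_eq, hcount_src, hcount_pairs]
  have hEq : sA = pairs t := by
    refine PySem.List.eq_of_perm_of_pairwise_le_of_injective (fun x => -x) neg_injective hperm ?_ ?_
    · exact (PySem.List.sorted_pairwise_rev src (fun x => x)).imp (fun h => by simpa using h)
    · exact (htsort.sublist (pairs_sublist t)).imp (fun h => by simpa using h)
  rw [range2_loop, hEq, solutionAltGo_eq]
  simp [pendArea]
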